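-- pv_equiv track=rewrite | github.com/paiml/depyler | examples/hard_wave3_082.py | worst_fit_allocate
-- ===== SOURCE A (Python) =====
-- from typing import Dict, List, Tuple
--
-- def worst_fit_allocate(blocks: List[int], request: int) -> int:
--     """Find largest block that fits request."""
--     best: int = -1
--     best_size: int = -1
--     i: int = 0
--     while i < len(blocks):
--         if blocks[i] >= request and blocks[i] > best_size:
--             best = i
--             best_size = blocks[i]
--         i += 1
--     return best
-- ===== SOURCE B (Python) =====
-- def worst_fit_allocate(blocks, request):
--     """Find largest block that fits request."""
--     candidates = [i for i in range(len(blocks)) if blocks[i] >= request]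
--     if not candidates:
--         return -1
--     return max(candidates, key=lambda i: blocks[i])
-- ===== Notes on version B (the rewrite author's own statement) =====
-- stated objective: faster
-- what changed: A's single interleaved argmax scan with (best,best_size) state is replaced by a filter phase collecting all fitting indices followed by a separate max-by-key reduction (first maximal wins); both passes run in C-level builtins (list comprehension and max) instead of an interpreted index loop.
-- intended difference: On inputs where some block fits the request but every fitting block is <= -1, A's best_size sentinel -1 shadows them all and A returns -1 (no allocation) even though a block fits; B returns the index of the first largest fitting block, which is the intended answer. — e.g. on worst_fit_allocate([-2], -5): A returns -1, B returns 0
import Mathlib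
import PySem

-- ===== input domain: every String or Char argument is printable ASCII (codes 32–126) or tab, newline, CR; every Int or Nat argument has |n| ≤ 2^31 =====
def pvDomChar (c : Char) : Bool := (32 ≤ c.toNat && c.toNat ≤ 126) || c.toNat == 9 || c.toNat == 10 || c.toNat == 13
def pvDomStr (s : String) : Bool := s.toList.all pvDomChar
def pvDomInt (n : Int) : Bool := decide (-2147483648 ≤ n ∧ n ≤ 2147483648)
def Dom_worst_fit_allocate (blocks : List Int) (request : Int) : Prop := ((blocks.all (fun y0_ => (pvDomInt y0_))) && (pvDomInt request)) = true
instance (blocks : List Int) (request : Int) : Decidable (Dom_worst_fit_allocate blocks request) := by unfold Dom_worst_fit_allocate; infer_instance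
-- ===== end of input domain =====

-- B replaces A's interleaved argmax scan by a filter phase (all fitting indices) followed by a
-- separate first-maximal max-by-key reduction; on the D_ inputs below B returns the intended index
-- where A's -1 sentinel makes it return -1.

-- ===== PORT A =====
-- while i < len(blocks): if blocks[i] >= request and blocks[i] > best_size: best, best_size = i, blocks[i]; i += 1
def worst_fit_allocate (blocks : List Int) (request : Int) : Int :=
  ((PySem.List.pyRange 0 blocks.length 1).foldl
    (fun (st : Int × Int) i =>
      if PySem.List.pyGetD blocks i 0 ≥ request ∧ PySem.List.pyGetD blocks i 0 > st.2
      then (i, PySem.List.pyGetD blocks i 0) else st)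
    (-1, -1)).1

-- ===== PORT B =====
-- candidates = [i for i in range(len(blocks)) if blocks[i] >= request]; return -1 if empty else max(candidates, key=blocks[i])
def worst_fit_allocate_alt (blocks : List Int) (request : Int) : Int :=
  let candidates := (PySem.List.pyRange 0 blocks.length 1).filter
    (fun i => PySem.List.pyGetD blocks i 0 ≥ request)
  match PySem.List.max? candidates (fun i => PySem.List.pyGetD blocks i 0) with
  | none => -1
  | some m => m

-- ===== PRECONDITION & SPEC =====
-- On inputs where some block fits the request but every fitting block is ≤ -1, A's best_size
-- sentinel -1 shadows them all and A returns -1 even though a block fits; B returns the index of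
-- the first largest fitting block, which is the intended answer.
def D_worst_fit_allocate (blocks : List Int) (request : Int) : Prop :=
  (∃ b ∈ blocks, b ≥ request) ∧ (∀ b ∈ blocks, b ≥ request → b ≤ -1)
instance (blocks : List Int) (request : Int) : Decidable (D_worst_fit_allocate blocks request) := by
  unfold D_worst_fit_allocate; infer_instance

def Spec_worst_fit_allocate (blocks : List Int) (request : Int) (out : Int) : Prop :=
  ¬ D_worst_fit_allocate blocks request → out = worst_fit_allocate_alt blocks request
instance (blocks : List Int) (request : Int) (out : Int) : Decidable (Spec_worst_fit_allocate blocks request out) := by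
  unfold Spec_worst_fit_allocate; infer_instance

def pvDiffWitness_worst_fit_allocate : List Int × Int := ([-2], -5)
def pvDiffWitnessOut_worst_fit_allocate : Int × Int := (-1, 0)

-- ===== CLAIM (what is proved, stated in full; the proofs are below) =====
def Claim_unchanged_worst_fit_allocate : Prop := ∀ (blocks : List Int) (request : Int), Dom_worst_fit_allocate blocks request → Spec_worst_fit_allocate blocks request (worst_fit_allocate blocks request)
def Claim_changed_worst_fit_allocate : Prop := Dom_worst_fit_allocate (pvDiffWitness_worst_fit_allocate.1) (pvDiffWitness_worst_fit_allocate.2) ∧ D_worst_fit_allocate (pvDiffWitness_worst_fit_allocate.1) (pvDiffWitness_worst_fit_allocate.2) ∧ worst_fit_allocate (pvDiffWitness_worst_fit_allocate.1) (pvDiffWitness_worst_fit_allocate.2) = pvDiffWitnessOut_worst_fit_allocate.1 ∧ worst_fit_allocate_alt (pvDiffWitness_worst_fit_allocate.1) (pvDiffWitness_worst_fit_allocate.2) = pvDiffWitnessOut_worst_fit_allocate.2 ∧ pvDiffWitnessOut_worst_fit_allocate.1 ≠ pvDiffWitnessOut_worst_fit_allocate.2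
def Claim_exact_worst_fit_allocate : Prop := ∀ (blocks : List Int) (request : Int), Dom_worst_fit_allocate blocks request → D_worst_fit_allocate blocks request → worst_fit_allocate blocks request ≠ worst_fit_allocate_alt blocks request

-- ===== LEMMAS AND PROOFS =====

-- proof-side names for the key, the candidate list and the two fold steps
def pvKey (blocks : List Int) (i : Int) : Int := PySem.List.pyGetD blocks i 0

def pvCand (blocks : List Int) (request : Int) : List Int :=
  (PySem.List.pyRange 0 blocks.length 1).filter (fun i => pvKey blocks i ≥ request)

def pvAStep (blocks : List Int) (request : Int) (st : Int × Int) (i : Int) : Int × Int :=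
  if pvKey blocks i ≥ request ∧ pvKey blocks i > st.2 then (i, pvKey blocks i) else st

def pvBStep (blocks : List Int) (acc : Option Int) (i : Int) : Option Int :=
  match acc with
  | none => some i
  | some m => if pvKey blocks m < pvKey blocks i then some i else some m

lemma Bfold_eq_max? (blocks : List Int) (l : List Int) :
    l.foldl (pvBStep blocks) none = PySem.List.max? l (fun i => PySem.List.pyGetD blocks i 0) := by
  rw [PySem.List.max?]
  congr 1
  funext acc x
  cases acc <;> rfl

lemma A_eq (blocks : List Int) (request : Int) :
    worst_fit_allocate blocks request =
      ((PySem.List.pyRange 0 blocks.length 1).foldl (pvAStep blocks request) (-1, -1)).1 := rfl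

lemma B_eq (blocks : List Int) (request : Int) :
    worst_fit_allocate_alt blocks request =
      match (pvCand blocks request).foldl (pvBStep blocks) none with
      | none => -1
      | some m => m := by
  rw [worst_fit_allocate_alt, Bfold_eq_max?]; rfl

lemma mem_pvCand {blocks : List Int} {request i : Int} :
    i ∈ pvCand blocks request ↔ 0 ≤ i ∧ i < blocks.length ∧ pvKey blocks i ≥ request := by
  simp [pvCand, PySem.List.mem_pyRange_one, and_assoc]

lemma key_mem_blocks {blocks : List Int} {i : Int} (h0 : 0 ≤ i) (h1 : i < blocks.length) :
    pvKey blocks i ∈ blocks := by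
  rw [pvKey, PySem.List.pyGetD_eq_getElem blocks 0 h0 h1]
  exact List.getElem_mem _

lemma mem_pvCand_of_block {blocks : List Int} {request b : Int}
    (hb : b ∈ blocks) (hr : b ≥ request) :
    ∃ i ∈ pvCand blocks request, pvKey blocks i = b := by
  obtain ⟨j, hj, rfl⟩ := List.mem_iff_getElem.1 hb
  refine ⟨(j : Int), mem_pvCand.2 ⟨Int.natCast_nonneg j, by exact_mod_cast hj, ?_⟩, ?_⟩ <;>
    simp [pvKey, PySem.List.pyGetD_natCast, List.getD_eq_getElem?_getD, hj, hr]

-- the A-fold skips non-candidates: fold over the full range = fold over the candidates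
lemma A_foldl_filter (blocks : List Int) (request : Int) (l : List Int) (st : Int × Int) :
    l.foldl (pvAStep blocks request) st =
      (l.filter (fun i => pvKey blocks i ≥ request)).foldl (pvAStep blocks request) st := by
  induction l generalizing st with
  | nil => rfl
  | cons x t ih =>
    by_cases hx : pvKey blocks x ≥ request
    · simp [hx, ih]
    · simp [hx, pvAStep, ih]

-- aligned states: once A holds (m, key m) and B holds some m, they move in lockstep over candidates
lemma aligned (blocks : List Int) (request : Int) (l : List Int) (m : Int)
    (hreq : ∀ i ∈ l, pvKey blocks i ≥ request) :
    ∃ m', l.foldl (pvBStep blocks) (some m) = some m' ∧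
      l.foldl (pvAStep blocks request) (m, pvKey blocks m) = (m', pvKey blocks m') ∧
      pvKey blocks m ≤ pvKey blocks m' := by
  induction l generalizing m with
  | nil => exact ⟨m, rfl, rfl, le_refl _⟩
  | cons x t ih =>
    have hx : pvKey blocks x ≥ request := hreq x List.mem_cons_self
    have hreq' : ∀ i ∈ t, pvKey blocks i ≥ request := fun i hi => hreq i (List.mem_cons_of_mem _ hi)
    by_cases hlt : pvKey blocks m < pvKey blocks x
    · obtain ⟨m', h1, h2, h3⟩ := ih x hreq'
      exact ⟨m', by simpa [pvBStep, hlt] using h1,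
        by simpa [pvAStep, hx, hlt] using h2, le_trans (le_of_lt hlt) h3⟩
    · obtain ⟨m', h1, h2, h3⟩ := ih m hreq'
      exact ⟨m', by simpa [pvBStep, hlt] using h1, by simpa [pvAStep, hlt] using h2, h3⟩

-- from the (-1,-1) / some m start with key m ≤ -1: B may pick up negative candidates A ignores
lemma shadowed (blocks : List Int) (request : Int) (l : List Int) (m : Int)
    (hm : pvKey blocks m ≤ -1) (hreq : ∀ i ∈ l, pvKey blocks i ≥ request) :
    ∃ m', l.foldl (pvBStep blocks) (some m) = some m' ∧
      ((pvKey blocks m' > -1 ∧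
          l.foldl (pvAStep blocks request) (-1, -1) = (m', pvKey blocks m')) ∨
       (pvKey blocks m' ≤ -1 ∧
          l.foldl (pvAStep blocks request) (-1, -1) = (-1, -1))) := by
  induction l generalizing m with
  | nil => exact ⟨m, rfl, Or.inr ⟨hm, rfl⟩⟩
  | cons x t ih =>
    have hxr : pvKey blocks x ≥ request := hreq x List.mem_cons_self
    have hreq' : ∀ i ∈ t, pvKey blocks i ≥ request := fun i hi => hreq i (List.mem_cons_of_mem _ hi)
    by_cases hx : pvKey blocks x > -1
    · -- A accepts x; from here the two states are aligned
      obtain ⟨m', h1, h2, h3⟩ := aligned blocks request t x hreq'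
      have hlt : pvKey blocks m < pvKey blocks x := by omega
      refine ⟨m', by simpa [pvBStep, hlt] using h1, Or.inl ⟨by omega, ?_⟩⟩
      simpa [pvAStep, hxr, show pvKey blocks x > (-1 : Int) by omega] using h2
    · -- A ignores x; B's current key stays ≤ -1 either way
      push Not at hx
      by_cases hlt : pvKey blocks m < pvKey blocks x
      · obtain ⟨m', h1, h2⟩ := ih x hx hreq'
        exact ⟨m', by simpa [pvBStep, hlt] using h1,
          by simpa [pvAStep, show ¬ pvKey blocks x > (-1 : Int) by omega] using h2⟩
      · obtain ⟨m', h1, h2⟩ := ih m hm hreq'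
        exact ⟨m', by simpa [pvBStep, hlt] using h1,
          by simpa [pvAStep, show ¬ pvKey blocks x > (-1 : Int) by omega] using h2⟩

lemma cand_key_max {blocks : List Int} {request m' : Int}
    (h : (pvCand blocks request).foldl (pvBStep blocks) none = some m') :
    m' ∈ pvCand blocks request ∧ ∀ y ∈ pvCand blocks request, pvKey blocks y ≤ pvKey blocks m' := by
  rw [Bfold_eq_max?] at h
  exact ⟨PySem.List.max?_mem h, fun y hy => PySem.List.max?_isMax h y hy⟩

-- the core dichotomy: either A = B, or D_ holds, A = -1 and B = m' ≥ 0
lemma core (blocks : List Int) (request : Int) :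
    worst_fit_allocate blocks request = worst_fit_allocate_alt blocks request ∨
      (D_worst_fit_allocate blocks request ∧ worst_fit_allocate blocks request = -1 ∧
        0 ≤ worst_fit_allocate_alt blocks request) := by
  rw [A_eq, B_eq, A_foldl_filter, ← pvCand]
  have hreq : ∀ i ∈ pvCand blocks request, pvKey blocks i ≥ request :=
    fun i hi => (mem_pvCand.1 hi).2.2
  cases hc : pvCand blocks request with
  | nil => exact Or.inl rfl
  | cons x t =>
    have hxmem : x ∈ pvCand blocks request := by rw [hc]; exact List.mem_cons_self
    have hxreq : pvKey blocks x ≥ request := hreq x hxmem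
    have hreq' : ∀ i ∈ t, pvKey blocks i ≥ request :=
      fun i hi => hreq i (by rw [hc]; exact List.mem_cons_of_mem _ hi)
    simp only [List.foldl_cons]
    by_cases hx : pvKey blocks x > -1
    · obtain ⟨m', h1, h2, _⟩ := aligned blocks request t x hreq'
      rw [show pvAStep blocks request (-1, -1) x = (x, pvKey blocks x) by
            simp [pvAStep, hxreq, hx],
          show pvBStep blocks none x = some x from rfl, h1, h2]
      exact Or.inl rfl
    · push Not at hx
      obtain ⟨m', h1, hcase⟩ := shadowed blocks request t x hx hreq'
      have hfold : (pvCand blocks request).foldl (pvBStep blocks) none = some m' := by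
        rw [hc]; simpa using h1
      obtain ⟨hm'mem, hmax⟩ := cand_key_max hfold
      rw [show pvAStep blocks request (-1, -1) x = (-1, -1) by
            simp [pvAStep]; omega,
          show pvBStep blocks none x = some x from rfl, h1]
      rcases hcase with ⟨_, hA⟩ | ⟨hneg, hA⟩
      · rw [hA]; exact Or.inl rfl
      · rw [hA]
        refine Or.inr ⟨⟨?_, ?_⟩, rfl, (mem_pvCand.1 hm'mem).1⟩
        · obtain ⟨h0, h1', _⟩ := mem_pvCand.1 hxmem
          exact ⟨pvKey blocks x, key_mem_blocks h0 h1', hxreq⟩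
        · intro b hb hbr
          obtain ⟨i, hi, hik⟩ := mem_pvCand_of_block hb hbr
          have := hmax i hi
          omega

-- ===== VERDICT (by name: the statement is the Claim_ definition above) =====
theorem worst_fit_allocate_spec : Claim_unchanged_worst_fit_allocate := by
  intro blocks request _ hD
  rcases core blocks request with h | ⟨hDholds, _, _⟩
  · exact h
  · exact absurd hDholds hD

theorem worst_fit_allocate_changed : Claim_changed_worst_fit_allocate := by
  unfold Claim_changed_worst_fit_allocate; decide

theorem worst_fit_allocate_tight : Claim_exact_worst_fit_allocate := by
  intro blocks request _ hD
  rcases core blocks request with h | ⟨_, hA, hB⟩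
  · -- A = B contradicts D_: if they are equal, A returned a candidate index or -1;
    -- show A = -1 and B ≥ 0 still, via the dichotomy being exclusive under D_
    exfalso
    obtain ⟨⟨b, hb, hbr⟩, hall⟩ := hD
    obtain ⟨i, hi, hik⟩ := mem_pvCand_of_block hb hbr
    -- under D_ every candidate key ≤ -1, so the shadowed branch applies; redo the case split
    rw [A_eq, B_eq, A_foldl_filter, ← pvCand] at h
    have hreq : ∀ j ∈ pvCand blocks request, pvKey blocks j ≥ request :=
      fun j hj => (mem_pvCand.1 hj).2.2
    have hneg : ∀ j ∈ pvCand blocks request, pvKey blocks j ≤ -1 := by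
      intro j hj
      obtain ⟨h0, h1, h2⟩ := mem_pvCand.1 hj
      exact hall _ (key_mem_blocks h0 h1) h2
    cases hc : pvCand blocks request with
    | nil => rw [hc] at hi; exact absurd hi (List.not_mem_nil)
    | cons x t =>
      have hxmem : x ∈ pvCand blocks request := by rw [hc]; exact List.mem_cons_self
      have hx : pvKey blocks x ≤ -1 := hneg x hxmem
      have hreq' : ∀ j ∈ t, pvKey blocks j ≥ request :=
        fun j hj => hreq j (by rw [hc]; exact List.mem_cons_of_mem _ hj)
      obtain ⟨m', h1, hcase⟩ := shadowed blocks request t x hx hreq'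
      have hfold : (pvCand blocks request).foldl (pvBStep blocks) none = some m' := by
        rw [hc]; simpa using h1
      obtain ⟨hm'mem, _⟩ := cand_key_max hfold
      have hm'neg : pvKey blocks m' ≤ -1 := hneg m' hm'mem
      rcases hcase with ⟨hpos, _⟩ | ⟨_, hA'⟩
      · omega
      · rw [hc] at h
        simp only [List.foldl_cons] at h
        rw [show pvAStep blocks request (-1, -1) x = (-1, -1) by
              simp [pvAStep]; omega,
            show pvBStep blocks none x = some x from rfl, h1, hA'] at h
        have : 0 ≤ m' := (mem_pvCand.1 hm'mem).1
        simp at h; omega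
  · omega
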